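-- pv_equiv track=rewrite | github.com/miczek2309/logia | ile_nie_parzystych_iloczynow.py | ile_nie_parzystych_iloczynow
-- ===== SOURCE A (Python) =====
-- def ile_nie_parzystych_iloczynow(N):
--     u = 1
--     e = 0
--     for i in N[:len(N) - 1]:
--         for x in N[u:]:
--             if i * x % 2 != 0:
--                 e = e + 1
--         u = u + 1
--     return e
-- ===== SOURCE B (Python) =====
-- def ile_nie_parzystych_iloczynow(N):
--     k = 0
--     for x in N:
--         if x % 2 != 0:
--             k = k + 1
--     return k * (k - 1) // 2
-- ===== Notes on version B (the rewrite author's own statement) =====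
-- stated objective: faster
-- what changed: replaces the quadratic double loop over all pairs by a single pass counting the odd elements k and the closed form k*(k-1)//2
import Mathlib
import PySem

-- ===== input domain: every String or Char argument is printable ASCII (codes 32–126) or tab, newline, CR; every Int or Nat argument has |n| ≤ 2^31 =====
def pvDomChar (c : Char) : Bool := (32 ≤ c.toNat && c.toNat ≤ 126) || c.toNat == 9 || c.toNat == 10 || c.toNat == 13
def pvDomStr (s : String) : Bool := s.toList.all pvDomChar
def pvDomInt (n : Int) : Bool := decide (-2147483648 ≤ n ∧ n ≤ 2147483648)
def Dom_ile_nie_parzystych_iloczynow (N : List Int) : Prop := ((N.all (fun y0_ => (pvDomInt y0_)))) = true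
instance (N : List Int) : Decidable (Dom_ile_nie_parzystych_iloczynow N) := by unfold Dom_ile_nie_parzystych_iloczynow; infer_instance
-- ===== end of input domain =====

-- B replaces A's quadratic pair loop by a single pass counting odd elements k and the closed form k*(k-1)//2 (asymptotically faster).

-- ===== PORT A =====
-- literal transliteration: u = 1; e = 0; for i in N[:len(N)-1]: (for x in N[u:]: if i*x % 2 != 0: e = e+1); u = u+1; return e
def ile_nie_parzystych_iloczynow (N : List Int) : Int :=
  ((PySem.List.slice N none (some ((N.length : Int) - 1))).foldl
    (fun (ue : Int × Int) i =>
      (ue.1 + 1,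
       (PySem.List.slice N (some ue.1) none).foldl
         (fun e x => if PySem.Int.mod (i * x) 2 ≠ 0 then e + 1 else e) ue.2))
    ((1 : Int), (0 : Int))).2

-- ===== PORT B =====
-- literal transliteration of Source B: k = 0; for x in N: if x % 2 != 0: k = k+1; return k*(k-1)//2
def ile_nie_parzystych_iloczynow_alt (N : List Int) : Int :=
  let k := N.foldl (fun k x => if PySem.Int.mod x 2 ≠ 0 then k + 1 else k) (0 : Int)
  PySem.Int.floordiv (k * (k - 1)) 2

-- ===== PRECONDITION & SPEC =====
def Spec_ile_nie_parzystych_iloczynow (N : List Int) (out : Int) : Prop := out = ile_nie_parzystych_iloczynow_alt N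
instance (N : List Int) (out : Int) : Decidable (Spec_ile_nie_parzystych_iloczynow N out) := by unfold Spec_ile_nie_parzystych_iloczynow; infer_instance

-- ===== CLAIM (what is proved, stated in full; the proofs are below) =====
def Claim_equal_ile_nie_parzystych_iloczynow : Prop := ∀ (N : List Int), Dom_ile_nie_parzystych_iloczynow N → Spec_ile_nie_parzystych_iloczynow N (ile_nie_parzystych_iloczynow N)

-- ===== LEMMAS AND PROOFS =====

-- number of odd elements of a list
def pvOc : List Int → Int
  | [] => 0
  | x :: t => (if PySem.Int.mod x 2 ≠ 0 then 1 else 0) + pvOc t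

lemma pvOc_foldl : ∀ (L : List Int) (e : Int),
    L.foldl (fun k x => if PySem.Int.mod x 2 ≠ 0 then k + 1 else k) e = e + pvOc L := by
  intro L; induction L with
  | nil => intro e; simp [pvOc]
  | cons x t ih => intro e; simp only [List.foldl_cons, pvOc, ih]; split_ifs <;> ring

-- count of x in L with i*x odd
def pvIcnt (i : Int) : List Int → Int
  | [] => 0
  | x :: t => (if PySem.Int.mod (i * x) 2 ≠ 0 then 1 else 0) + pvIcnt i t

lemma pvIcnt_foldl : ∀ (i : Int) (L : List Int) (e : Int),
    L.foldl (fun e x => if PySem.Int.mod (i * x) 2 ≠ 0 then e + 1 else e) e = e + pvIcnt i L := by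
  intro i L; induction L with
  | nil => intro e; simp [pvIcnt]
  | cons x t ih => intro e; simp only [List.foldl_cons, pvIcnt, ih]; split_ifs <;> ring

lemma pvMod_mul_two (i x : Int) :
    (PySem.Int.mod (i * x) 2 ≠ 0) ↔ (PySem.Int.mod i 2 ≠ 0 ∧ PySem.Int.mod x 2 ≠ 0) := by
  have h2 : (0 : Int) < 2 := by norm_num
  rw [PySem.Int.mod_eq_emod_of_pos h2, PySem.Int.mod_eq_emod_of_pos h2,
      PySem.Int.mod_eq_emod_of_pos h2]
  rcases Int.emod_two_eq i with h | h <;> rcases Int.emod_two_eq x with h' | h' <;>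
    simp [Int.mul_emod, h, h']

lemma pvIcnt_eq (i : Int) : ∀ (L : List Int),
    pvIcnt i L = if PySem.Int.mod i 2 ≠ 0 then pvOc L else 0 := by
  intro L; induction L with
  | nil => simp [pvIcnt, pvOc]
  | cons x t ih =>
    unfold pvIcnt pvOc
    rw [ih]
    simp only [pvMod_mul_two]
    split_ifs <;> omega

-- the pair count computed recursively
def pvG : List Int → Int
  | [] => 0
  | x :: t => pvIcnt x t + pvG t

lemma pvG_closed : ∀ (L : List Int), 2 * pvG L = pvOc L * (pvOc L - 1) := by
  intro L; induction L with
  | nil => simp [pvG, pvOc]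
  | cons x t ih =>
    unfold pvG pvOc
    rw [pvIcnt_eq]
    split_ifs <;> linear_combination ih

-- A's outer-loop step, parameterised by the base list the slices refer to
def pvStep (N : List Int) (ue : Int × Int) (i : Int) : Int × Int :=
  (ue.1 + 1,
   (PySem.List.slice N (some ue.1) none).foldl
     (fun e x => if PySem.Int.mod (i * x) 2 ≠ 0 then e + 1 else e) ue.2)

lemma pvStep_eq (N : List Int) (u : Nat) (e i : Int) :
    pvStep N (((u : Nat) : Int), e) i = (((u : Nat) : Int) + 1, e + pvIcnt i (N.drop u)) := by
  simp only [pvStep, PySem.List.slice_from_natCast, pvIcnt_foldl]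

-- shifting the base list: counter u+1 over (x :: xs) behaves like counter u over xs
lemma pvShift : ∀ (M : List Int) (x : Int) (xs : List Int) (u : Nat) (e : Int),
    (M.foldl (pvStep (x :: xs)) ((((u + 1 : Nat)) : Int), e)).2
      = (M.foldl (pvStep xs) (((u : Nat) : Int), e)).2 := by
  intro M; induction M with
  | nil => intro x xs u e; simp
  | cons i M ih =>
    intro x xs u e
    simp only [List.foldl_cons, pvStep_eq]
    have hd : (x :: xs).drop (u + 1) = xs.drop u := by simp
    rw [hd]
    have h1 : ((u + 1 : Nat) : Int) + 1 = ((u + 2 : Nat) : Int) := by push_cast; ring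
    have h2 : ((u : Nat) : Int) + 1 = ((u + 1 : Nat) : Int) := by push_cast; ring
    rw [h1, h2, ih]

-- the accumulator is additive
lemma pvAdd : ∀ (M N : List Int) (c e : Int),
    (M.foldl (pvStep N) (c, e)).2 = e + (M.foldl (pvStep N) (c, 0)).2 := by
  intro M; induction M with
  | nil => intro N c e; simp
  | cons i M ih =>
    intro N c e
    simp only [List.foldl_cons, pvStep, pvIcnt_foldl]
    rw [ih N (c + 1) (e + pvIcnt i (PySem.List.slice N (some c) none)),
        ih N (c + 1) (0 + pvIcnt i (PySem.List.slice N (some c) none))]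
    ring

lemma pvMain : ∀ (N : List Int),
    ((N.dropLast).foldl (pvStep N) ((((1 : Nat)) : Int), (0 : Int))).2 = pvG N := by
  intro N; induction N with
  | nil => simp [pvG]
  | cons x xs ih =>
    match xs, ih with
    | [], _ => simp [pvG, pvIcnt]
    | y :: t, ih =>
      have hne : (y :: t) ≠ ([] : List Int) := by simp
      rw [List.dropLast_cons_of_ne_nil hne]
      simp only [List.foldl_cons]
      rw [pvStep_eq]
      have hd : (x :: y :: t).drop 1 = y :: t := by simp
      rw [hd]
      have h2 : (((1 : Nat)) : Int) + 1 = ((1 + 1 : Nat) : Int) := by omega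
      rw [h2, pvShift, pvAdd, ih]
      simp [pvG]

lemma pvSliceOuter (N : List Int) :
    PySem.List.slice N none (some ((N.length : Int) - 1)) = N.dropLast := by
  cases N with
  | nil => simp [PySem.List.slice_to_neg_one]
  | cons x xs =>
    have h : ((x :: xs).length : Int) - 1 = ((xs.length : Nat) : Int) := by
      simp
    rw [h, PySem.List.slice_to_natCast]
    rw [List.dropLast_eq_take]
    simp

-- ===== VERDICT (by name: the statement is the Claim_ definition above) =====
theorem ile_nie_parzystych_iloczynow_spec : Claim_equal_ile_nie_parzystych_iloczynow := by
  intro N _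
  show ile_nie_parzystych_iloczynow N = ile_nie_parzystych_iloczynow_alt N
  have hA : ile_nie_parzystych_iloczynow N = pvG N := by
    unfold ile_nie_parzystych_iloczynow
    rw [pvSliceOuter]
    rw [show (fun (ue : Int × Int) i =>
        (ue.1 + 1,
         (PySem.List.slice N (some ue.1) none).foldl
           (fun e x => if PySem.Int.mod (i * x) 2 ≠ 0 then e + 1 else e) ue.2)) = pvStep N from rfl]
    rw [show ((1 : Int), (0 : Int)) = ((((1 : Nat)) : Int), (0 : Int)) from by norm_num]
    exact pvMain N
  have hB : ile_nie_parzystych_iloczynow_alt N = pvG N := by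
    unfold ile_nie_parzystych_iloczynow_alt
    rw [pvOc_foldl]
    have hc : 2 * pvG N = pvOc N * (pvOc N - 1) := pvG_closed N
    have h2 : (0 : Int) < 2 := by norm_num
    rw [PySem.Int.floordiv_eq_ediv_of_pos h2]
    have h : (0 + pvOc N) * (0 + pvOc N - 1) = 2 * pvG N := by linear_combination -hc
    rw [h, Int.mul_ediv_cancel_left _ (by norm_num : (2:Int) ≠ 0)]
  rw [hA, hB]
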